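-- pv_equiv track=rewrite | github.com/serlabel/Tuenti-Challenge-6 | 09/immiscible.py | immiscible
-- ===== SOURCE A (Python) =====
-- def immiscible(x):
--     # Remove 2-and-5-factors
--     zeros = 0
--     while x%10 == 0:
--         zeros += 1
--         x //= 10
--     if x%2 == 0:
--         while x%2 == 0:
--             zeros += 1
--             x //= 2
--     elif x%5 == 0:
--         while x%5 == 0:
--             zeros += 1
--             x //= 5
--     # immiscible(x) = immiscible(x') * 10**zeros
--     # inmiscible(x') is an all-ones number
--     ones = 1
--     n = 1%x
--     while n != 0:
--         n = ((10*n)%x + 1)%x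
--         ones += 1
--     return ones, zeros
-- ===== SOURCE B (Python) =====
-- def _val(p, y):
--     # recursive p-adic valuation: returns (count, y with all p-factors removed)
--     if y % p != 0:
--         return 0, y
--     c, r = _val(p, y // p)
--     return c + 1, r
--
-- def immiscible(x):
--     # B: strip 2s and 5s from |x| by recursive valuation (zeros = max of the two),
--     # then the repunit length is the least k >= 1 with pow(10, k, 9*reduced) == 1.
--     twos, y = _val(2, abs(x))
--     fives, y = _val(5, y)
--     m = 9 * y
--     ones = 1
--     while pow(10, ones, m) != 1:
--         ones += 1
--     return ones, max(twos, fives)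
-- ===== Notes on version B (the rewrite author's own statement) =====
-- stated objective: alternative
-- what changed: B strips 2s and 5s from |x| with a recursive (non-accumulator) valuation helper and takes the max of the two counts, and finds the repunit length as the least k>=1 with pow(10,k,9*reduced)==1 via the builtin three-argument pow, instead of A's iterative strip-10s-then-2s-or-5s branching and its repunit-remainder-mod-x while loop.
import Mathlib
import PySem

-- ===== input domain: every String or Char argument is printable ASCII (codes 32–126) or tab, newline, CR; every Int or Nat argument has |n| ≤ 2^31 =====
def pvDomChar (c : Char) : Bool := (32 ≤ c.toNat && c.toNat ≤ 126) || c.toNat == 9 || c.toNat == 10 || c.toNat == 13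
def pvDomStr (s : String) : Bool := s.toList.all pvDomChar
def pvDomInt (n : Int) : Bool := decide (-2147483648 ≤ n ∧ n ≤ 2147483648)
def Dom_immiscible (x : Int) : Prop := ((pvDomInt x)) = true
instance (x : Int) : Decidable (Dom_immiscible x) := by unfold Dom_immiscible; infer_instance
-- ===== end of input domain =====

-- B strips 2s and 5s from |x| by a recursive valuation helper (zeros = max of the two
-- counts) and finds the repunit length as the least k ≥ 1 with pow(10,k,9·reduced) = 1,
-- instead of A's iterative stripping and repunit-remainder loop (objective: alternative).

-- ===== PORT A =====
-- fuel-bounded transliteration of A's three identical strip-while-loops (fuel is a totality device only)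
def aStrip (p : Int) : Nat → Int → Int → Int × Int
  | 0, x, z => (x, z)
  | f+1, x, z =>
    if PySem.Int.mod x p = 0 then aStrip p f (PySem.Int.floordiv x p) (z+1) else (x, z)

-- A's `while n != 0` loop: n is the current repunit remainder mod x
def aOnes : Nat → Int → Int → Int → Int
  | 0, _, _, ones => ones
  | f+1, x, n, ones =>
    if n = 0 then ones
    else aOnes f x (PySem.Int.mod (PySem.Int.mod (10*n) x + 1) x) (ones+1)

def immiscible (x : Int) : Int × Int :=
  let fuel := 9 * x.natAbs + 10
  let s1 := aStrip 10 fuel x 0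
  let s2 := if PySem.Int.mod s1.1 2 = 0 then aStrip 2 fuel s1.1 s1.2
            else if PySem.Int.mod s1.1 5 = 0 then aStrip 5 fuel s1.1 s1.2
            else s1
  (aOnes fuel s2.1 (PySem.Int.mod 1 s2.1) 1, s2.2)

-- ===== PORT B =====
-- Source B's _val: recursive p-adic valuation, (count, reduced); fuel only for totality
def bVal (p : Int) : Nat → Int → Int × Int
  | 0, y => (0, y)
  | f+1, y =>
    if PySem.Int.mod y p ≠ 0 then (0, y)
    else
      let cr := bVal p f (PySem.Int.floordiv y p)
      (cr.1 + 1, cr.2)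

-- Source B's `while pow(10, ones, m) != 1` search; the builtin pow(10, k, m) (m > 0 here)
-- is ported by its value, PySem.Int.mod (10 ^ k.toNat) m
def bSearch : Nat → Int → Int → Int
  | 0, _, ones => ones
  | f+1, m, ones =>
    if PySem.Int.mod (10 ^ ones.toNat) m = 1 then ones
    else bSearch f m (ones + 1)

def immiscible_alt (x : Int) : Int × Int :=
  let fuel := 9 * x.natAbs + 10
  let t2 := bVal 2 fuel |x|
  let t5 := bVal 5 fuel t2.2
  let m := 9 * t5.2
  (bSearch fuel m 1, max t2.1 t5.1)

-- ===== PRECONDITION & SPEC =====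
-- Pre_ excludes only x = 0, on which the Python A loops forever (x % 10 == 0, x //= 10 never ends)
def Pre_immiscible (x : Int) : Prop := x ≠ 0
instance (x : Int) : Decidable (Pre_immiscible x) := by unfold Pre_immiscible; infer_instance
def pvWitness_immiscible : Int := 7

def Spec_immiscible (x : Int) (out : Int × Int) : Prop := out = immiscible_alt x
instance (x : Int) (out : Int × Int) : Decidable (Spec_immiscible x out) := by unfold Spec_immiscible; infer_instance

-- ===== CLAIM (what is proved, stated in full; the proofs are below) =====
def Claim_equal_immiscible : Prop := ∀ (x : Int), Dom_immiscible x → Pre_immiscible x → Spec_immiscible x (immiscible x)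

-- ===== LEMMAS AND PROOFS =====

-- proof-side helper: the power-of-10 remainder loop; bridges aOnes and bSearch
def powLoop : Nat → Int → Int → Int → Int
  | 0, _, _, ones => ones
  | f+1, m, r, ones =>
    if r = 1 then ones
    else powLoop f m (PySem.Int.mod (10*r) m) (ones+1)

-- shifting aStrip's accumulator
theorem aStrip_acc (p : Int) : ∀ (f : Nat) (y c : Int),
    aStrip p f y c = ((aStrip p f y 0).1, c + (aStrip p f y 0).2) := by
  intro f
  induction f with
  | zero => intro y c; simp [aStrip]
  | succ f ih =>
    intro y c
    simp only [aStrip]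
    split
    · rw [ih _ (c+1), ih _ (0+1)]; exact Prod.ext rfl (by ring_nf)
    · simp

-- bVal computes aStrip's result with components swapped
theorem bVal_eq_aStrip (p : Int) : ∀ (f : Nat) (y : Int),
    bVal p f y = ((aStrip p f y 0).2, (aStrip p f y 0).1) := by
  intro f
  induction f with
  | zero => intro y; simp [bVal, aStrip]
  | succ f ih =>
    intro y
    by_cases h : PySem.Int.mod y p = 0
    · have hB : bVal p (f+1) y
          = ((bVal p f (PySem.Int.floordiv y p)).1 + 1, (bVal p f (PySem.Int.floordiv y p)).2) := by
        simp [bVal, h]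
      have hS : aStrip p (f+1) y 0
          = ((aStrip p f (PySem.Int.floordiv y p) 0).1, 0 + 1 + (aStrip p f (PySem.Int.floordiv y p) 0).2) := by
        simp only [aStrip, if_pos h]
        exact aStrip_acc p f _ (0+1)
      rw [hB, ih, hS]
      refine Prod.ext ?_ rfl
      simp; ring
    · simp [bVal, aStrip, h]

-- characterization of the strip loop: it peels off exactly the p-adic part
theorem aStrip_spec (p : Int) (hp : 2 ≤ p) : ∀ (fuel : Nat) (y c : Int), y ≠ 0 → y.natAbs ≤ fuel →
    ∃ (k : Nat) (y' : Int), aStrip p fuel y c = (y', c + (k : Int)) ∧ y = y' * p ^ k ∧ ¬ (p ∣ y') ∧ y' ≠ 0 := by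
  intro fuel
  induction fuel with
  | zero =>
    intro y c hy hle
    exact absurd (Int.natAbs_eq_zero.mp (Nat.le_zero.mp hle)) hy
  | succ f ih =>
    intro y c hy hle
    by_cases hdvd : p ∣ y
    · have hmod : PySem.Int.mod y p = 0 := (PySem.Int.mod_eq_zero_iff_dvd y p).mpr hdvd
      have hq : PySem.Int.floordiv y p * p + PySem.Int.mod y p = y := PySem.Int.floordiv_mul_add_mod y p
      set y1 := PySem.Int.floordiv y p with hy1def
      have hyeq : y = y1 * p := by rw [hmod] at hq; omega
      have hy1 : y1 ≠ 0 := by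
        intro h; rw [h, zero_mul] at hyeq; exact hy hyeq
      have hlt : y1.natAbs < y.natAbs := by
        have : y.natAbs = y1.natAbs * p.natAbs := by rw [hyeq, Int.natAbs_mul]
        have hp2 : 2 ≤ p.natAbs := by omega
        have h0 : 0 < y1.natAbs := Int.natAbs_pos.mpr hy1
        calc y1.natAbs < y1.natAbs * 2 := by omega
          _ ≤ y1.natAbs * p.natAbs := Nat.mul_le_mul_left _ hp2
          _ = y.natAbs := this.symm
      obtain ⟨k, y', heq, hfac, hnd, hne⟩ := ih y1 (c+1) hy1 (by omega)
      refine ⟨k+1, y', ?_, ?_, hnd, hne⟩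
      · simp only [aStrip, hmod, ← hy1def, heq]
        congr 1
        push_cast; ring
      · rw [hyeq, hfac]; ring
    · refine ⟨0, y, ?_, by ring, hdvd, hy⟩
      have hmod : ¬ PySem.Int.mod y p = 0 := fun h => hdvd ((PySem.Int.mod_eq_zero_iff_dvd y p).mp h)
      simp [aStrip, hmod]

-- uniqueness of the decomposition y' * p^k with p ∤ y'
theorem pow_decomp_unique (p : Int) (hp : p ≠ 0) :
    ∀ (k1 : Nat) (k2 : Nat) (y1 y2 : Int), y1 * p ^ k1 = y2 * p ^ k2 → ¬ p ∣ y1 → ¬ p ∣ y2 →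
      k1 = k2 ∧ y1 = y2 := by
  intro k1
  induction k1 with
  | zero =>
    intro k2 y1 y2 h h1 h2
    cases k2 with
    | zero => simpa using h
    | succ j =>
      exfalso; apply h1
      refine ⟨y2 * p ^ j, ?_⟩
      simpa [pow_succ, mul_assoc, mul_comm, mul_left_comm] using h
  | succ i ih =>
    intro k2 y1 y2 h h1 h2
    cases k2 with
    | zero =>
      exfalso; apply h2
      refine ⟨y1 * p ^ i, ?_⟩
      simpa [pow_succ, mul_assoc, mul_comm, mul_left_comm] using h.symm
    | succ j =>
      have h' : (y1 * p ^ i) * p = (y2 * p ^ j) * p := by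
        simpa [pow_succ, mul_assoc] using h
      obtain ⟨hk, hy⟩ := ih j y1 y2 (mul_right_cancel₀ hp h') h1 h2
      exact ⟨by omega, hy⟩

-- n = 0 is the only multiple of t strictly between -t and t
theorem eq_zero_of_dvd_of_bounds {t n : Int} (ht : 0 < t) (hd : t ∣ n) (h1 : -t < n) (h2 : n < t) : n = 0 := by
  rcases hd with ⟨c, rfl⟩
  have hc1 : c < 1 := by
    by_contra h
    push_neg at h
    nlinarith
  have hc2 : -1 < c := by
    by_contra h
    push_neg at h
    nlinarith
  have : c = 0 := by omega
  simp [this]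

-- (9c+1) mod 9t = 9(c mod t) + 1
theorem key_emod {t : Int} (ht : 0 < t) (c : Int) : (9*c+1) % (9*t) = 9*(c % t) + 1 := by
  have hdd : 9*c+1 = (9*(c % t) + 1) + (9*t) * (c / t) := by
    nlinarith [Int.ediv_add_emod c t]
  rw [hdd, Int.add_mul_emod_self_left]
  have h0 : 0 ≤ c % t := Int.emod_nonneg c (by omega)
  have h1 : c % t < t := Int.emod_lt_of_pos c ht
  exact Int.emod_eq_of_lt (by omega) (by omega)

-- Python's mod preserves the residue modulo any divisor t of the modulus
theorem pymod_emod {x2 : Int} (t : Int) (hd : t ∣ x2) (a : Int) : (PySem.Int.mod a x2) % t = a % t := by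
  have hq : PySem.Int.floordiv a x2 * x2 + PySem.Int.mod a x2 = a := PySem.Int.floordiv_mul_add_mod a x2
  rcases hd with ⟨u, rfl⟩
  have h : PySem.Int.mod a (t*u) = a + (-(PySem.Int.floordiv a (t*u) * u)) * t := by
    linear_combination hq
  rw [h]; exact Int.add_mul_emod_self_right a _ t

-- bounds on Python's mod for nonzero modulus
theorem pymod_bounds {x2 : Int} (hx : x2 ≠ 0) (a : Int) :
    -|x2| < PySem.Int.mod a x2 ∧ PySem.Int.mod a x2 < |x2| := by
  rcases lt_or_gt_of_ne hx with h | h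
  · have hb := PySem.Int.mod_neg_bounds a h
    constructor <;> [skip; skip] <;> (rw [abs_of_neg h]; omega)
  · have h0 := PySem.Int.mod_nonneg a h
    have h1 := PySem.Int.mod_lt a h
    constructor <;> (rw [abs_of_pos h]; omega)

-- bSearch tests pow(10, ones, m) = 1; powLoop carries that value as r
theorem bSearch_eq_powLoop : ∀ (f : Nat) (m k : Int), 0 < m → 0 ≤ k →
    bSearch f m k = powLoop f m (PySem.Int.mod (10 ^ k.toNat) m) k := by
  intro f
  induction f with
  | zero => intro m k _ _; rfl
  | succ f ih =>
    intro m k hm hk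
    simp only [bSearch, powLoop]
    split
    · rfl
    · rw [ih m (k+1) hm (by omega)]
      congr 1
      have ht : (k+1).toNat = k.toNat + 1 := by omega
      have key : (10 * (10 ^ k.toNat % m)) % m = 10 ^ (k.toNat + 1) % m := by
        conv_lhs => rw [Int.mul_emod, Int.emod_emod_of_dvd _ dvd_rfl, ← Int.mul_emod]
        rw [pow_succ]; ring_nf
      rw [ht]
      simp only [PySem.Int.mod_eq_emod_of_pos hm]
      exact key.symm

-- lockstep: A's repunit-remainder loop and the power-of-10 loop advance together
theorem ones_lockstep {t : Int} (ht : 0 < t) {x2 : Int} (hx : x2 = t ∨ x2 = -t) :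
    ∀ (fuel : Nat) (n r ones : Int), -t < n → n < t → r = 9*(n % t) + 1 →
      aOnes fuel x2 n ones = powLoop fuel (9*t) r ones := by
  have hx0 : x2 ≠ 0 := by rcases hx with h | h <;> omega
  have habs : |x2| = t := by rcases hx with h | h <;> subst h <;> simp [abs_of_pos ht, abs_of_neg, ht]
  have hdt : t ∣ x2 := by rcases hx with h | h <;> subst h <;> [exact ⟨1, by ring⟩; exact ⟨-1, by ring⟩]
  intro fuel
  induction fuel with
  | zero => intro n r ones _ _ _; rfl
  | succ f ih =>
    intro n r ones h1 h2 hr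
    by_cases hn : n = 0
    · have hr1 : r = 1 := by subst hn; simp at hr; omega
      simp [aOnes, powLoop, hn, hr1]
    · have hr1 : r ≠ 1 := by
        intro h
        have hz : n % t = 0 := by omega
        exact hn (eq_zero_of_dvd_of_bounds ht (Int.dvd_of_emod_eq_zero hz) h1 h2)
      simp only [aOnes, powLoop, if_neg hn, if_neg hr1]
      set n' := PySem.Int.mod (PySem.Int.mod (10*n) x2 + 1) x2 with hn'def
      have hb := pymod_bounds hx0 (PySem.Int.mod (10*n) x2 + 1)
      rw [habs] at hb
      have e1 : n' % t = (PySem.Int.mod (10*n) x2 + 1) % t := pymod_emod t hdt _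
      have e2 : (PySem.Int.mod (10*n) x2) % t = (10*n) % t := pymod_emod t hdt _
      have e3 : n' % t = (10*(n % t)+1) % t := by
        rw [e1, Int.add_emod, e2, ← Int.add_emod]
        conv_rhs => rw [Int.add_emod, Int.mul_emod, Int.emod_emod_of_dvd n dvd_rfl, ← Int.mul_emod, ← Int.add_emod]
      have hr' : PySem.Int.mod (10*r) (9*t) = 9*(n' % t) + 1 := by
        rw [PySem.Int.mod_eq_emod_of_pos (by omega), hr]
        have h10 : 10*(9*(n % t)+1) = 9*(10*(n % t)+1) + 1 := by ring
        rw [h10, key_emod ht, ← e3]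
      exact ih n' _ (ones+1) hb.1 hb.2 hr'

-- 2∣x1 and 5∣x1 would force 10∣x1
theorem ten_dvd {x1 : Int} (h2 : 2 ∣ x1) (h5 : 5 ∣ x1) : 10 ∣ x1 := by
  rcases h5 with ⟨c, rfl⟩
  have h2c : (2:Int) ∣ c := by
    rcases (Int.prime_two.dvd_mul.mp h2) with h | h
    · norm_num at h
    · exact h
  rcases h2c with ⟨d, rfl⟩
  exact ⟨d, by ring⟩

-- A's stripping phase: result is x with the 2- and 5-parts removed, zeros = max of the valuations
theorem A_reduce (x : Int) (hx : x ≠ 0) (fuel : Nat) (hf : x.natAbs ≤ fuel) :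
    ∃ (α β : Nat) (x2 : Int),
      (if PySem.Int.mod (aStrip 10 fuel x 0).1 2 = 0 then
         aStrip 2 fuel (aStrip 10 fuel x 0).1 (aStrip 10 fuel x 0).2
       else if PySem.Int.mod (aStrip 10 fuel x 0).1 5 = 0 then
         aStrip 5 fuel (aStrip 10 fuel x 0).1 (aStrip 10 fuel x 0).2
       else aStrip 10 fuel x 0) = (x2, ((max α β : Nat) : Int)) ∧
      x = x2 * 2 ^ α * 5 ^ β ∧ ¬ (2 ∣ x2) ∧ ¬ (5 ∣ x2) ∧ x2 ≠ 0 := by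
  obtain ⟨m, x1, h10, hx10, hnd10, hx1⟩ := aStrip_spec 10 (by omega) fuel x 0 hx hf
  have hle1 : x1.natAbs ≤ fuel := by
    have h1 : x.natAbs = x1.natAbs * ((10:Int) ^ m).natAbs := by rw [hx10, Int.natAbs_mul]
    have h2 : 1 ≤ ((10:Int) ^ m).natAbs := by
      have : (0:Int) < 10 ^ m := by positivity
      omega
    have := Nat.le_mul_of_pos_right x1.natAbs (by omega : 0 < ((10:Int) ^ m).natAbs)
    omega
  rw [h10]
  simp only []
  by_cases h2d : 2 ∣ x1
  · have hc : PySem.Int.mod x1 2 = 0 := (PySem.Int.mod_eq_zero_iff_dvd x1 2).mpr h2d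
    rw [if_pos hc]
    obtain ⟨i, x2, hstr, hfac, hnd2, hx2⟩ := aStrip_spec 2 (by omega) fuel x1 (0 + (m:Int)) hx1 hle1
    have h5x1 : ¬ (5 ∣ x1) := fun h5 => hnd10 (ten_dvd h2d h5)
    refine ⟨m + i, m, x2, ?_, ?_, hnd2, ?_, hx2⟩
    · rw [hstr]
      congr 1
      have : max (m + i) m = m + i := by omega
      rw [this]; push_cast; ring
    · rw [hx10, hfac]
      have : (10:Int) ^ m = 2 ^ m * 5 ^ m := by rw [← mul_pow]; norm_num
      rw [this]; ring
    · intro h5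
      exact h5x1 (by rw [hfac]; exact h5.mul_right _)
  · have hc : ¬ PySem.Int.mod x1 2 = 0 := fun h => h2d ((PySem.Int.mod_eq_zero_iff_dvd x1 2).mp h)
    rw [if_neg hc]
    by_cases h5d : 5 ∣ x1
    · have hc5 : PySem.Int.mod x1 5 = 0 := (PySem.Int.mod_eq_zero_iff_dvd x1 5).mpr h5d
      rw [if_pos hc5]
      obtain ⟨j, x2, hstr, hfac, hnd5, hx2⟩ := aStrip_spec 5 (by omega) fuel x1 (0 + (m:Int)) hx1 hle1
      refine ⟨m, m + j, x2, ?_, ?_, ?_, hnd5, hx2⟩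
      · rw [hstr]
        congr 1
        have : max m (m + j) = m + j := by omega
        rw [this]; push_cast; ring
      · rw [hx10, hfac]
        have : (10:Int) ^ m = 2 ^ m * 5 ^ m := by rw [← mul_pow]; norm_num
        rw [this]; ring
      · intro h2
        exact h2d (by rw [hfac]; exact h2.mul_right _)
    · have hc5 : ¬ PySem.Int.mod x1 5 = 0 := fun h => h5d ((PySem.Int.mod_eq_zero_iff_dvd x1 5).mp h)
      rw [if_neg hc5]
      refine ⟨m, m, x1, ?_, ?_, h2d, h5d, hx1⟩
      · congr 1
        simp
      · rw [hx10]
        have : (10:Int) ^ m = 2 ^ m * 5 ^ m := by rw [← mul_pow]; norm_num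
        rw [this]; ring

-- B's valuation phase, through bVal_eq_aStrip
theorem B_reduce (x : Int) (hx : x ≠ 0) (fuel : Nat) (hf : x.natAbs ≤ fuel) :
    ∃ (a b : Nat) (y2 t : Int),
      bVal 2 fuel |x| = ((a : Int), y2) ∧ bVal 5 fuel y2 = ((b : Int), t) ∧
      |x| = t * 2 ^ a * 5 ^ b ∧ ¬ (2 ∣ t) ∧ ¬ (5 ∣ t) ∧ 0 < t := by
  have hax : |x| ≠ 0 := abs_ne_zero.mpr hx
  have haf : (|x|).natAbs ≤ fuel := by rwa [Int.natAbs_abs]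
  obtain ⟨a, y2, h2, hfac2, hnd2, hy2⟩ := aStrip_spec 2 (by omega) fuel |x| 0 hax haf
  have hle2 : y2.natAbs ≤ fuel := by
    have h1 : (|x|).natAbs = y2.natAbs * ((2:Int) ^ a).natAbs := by rw [hfac2, Int.natAbs_mul]
    have h2' : 1 ≤ ((2:Int) ^ a).natAbs := by
      have : (0:Int) < 2 ^ a := by positivity
      omega
    have := Nat.le_mul_of_pos_right y2.natAbs (by omega : 0 < ((2:Int) ^ a).natAbs)
    omega
  obtain ⟨b, t, h5, hfac5, hnd5, ht0⟩ := aStrip_spec 5 (by omega) fuel y2 0 hy2 hle2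
  have htpos : 0 < t := by
    have hxpos : 0 < |x| := abs_pos.mpr hx
    have : |x| = t * (5 ^ b * 2 ^ a) := by rw [hfac2, hfac5]; ring
    by_contra h
    push_neg at h
    have hprod : (0:Int) < 5 ^ b * 2 ^ a := by positivity
    nlinarith [this, hxpos, hprod]
  refine ⟨a, b, y2, t, ?_, ?_, by rw [hfac2, hfac5]; ring, ?_, hnd5, htpos⟩
  · rw [bVal_eq_aStrip, h2]; simpa using rfl
  · rw [bVal_eq_aStrip, h5]; simpa using rfl
  · intro h2t
    exact hnd2 (by rw [hfac5]; exact h2t.mul_right _)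

-- the two decompositions coincide
theorem match_decomp {x x2 t : Int} {α β a b : Nat}
    (hA : x = x2 * 2 ^ α * 5 ^ β) (hB : |x| = t * 2 ^ a * 5 ^ b)
    (h2 : ¬ (2 ∣ x2)) (h5 : ¬ (5 ∣ x2)) (h2t : ¬ (2 ∣ t)) (h5t : ¬ (5 ∣ t)) :
    α = a ∧ β = b ∧ |x2| = t := by
  have h25 : ¬ ((2:Int) ∣ 5 ^ β) := fun h => by
    have := Int.prime_two.dvd_of_dvd_pow h
    norm_num at this
  have h25b : ¬ ((2:Int) ∣ 5 ^ b) := fun h => by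
    have := Int.prime_two.dvd_of_dvd_pow h
    norm_num at this
  have h2a : ¬ ((2:Int) ∣ |x2|) := fun h => h2 ((dvd_abs 2 x2).mp h)
  have h5a : ¬ ((5:Int) ∣ |x2|) := fun h => h5 ((dvd_abs 5 x2).mp h)
  have habs : (|x2| * 5 ^ β) * 2 ^ α = (t * 5 ^ b) * 2 ^ a := by
    have : |x| = |x2| * 2 ^ α * 5 ^ β := by
      rw [hA, abs_mul, abs_mul, abs_pow, abs_pow]
      norm_num
    rw [this] at hB
    linear_combination hB
  have hu1 : ¬ ((2:Int) ∣ |x2| * 5 ^ β) := fun h => by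
    rcases (Int.prime_two.dvd_mul.mp h) with h | h
    · exact h2a h
    · exact h25 h
  have hu2 : ¬ ((2:Int) ∣ t * 5 ^ b) := fun h => by
    rcases (Int.prime_two.dvd_mul.mp h) with h | h
    · exact h2t h
    · exact h25b h
  obtain ⟨hαa, hrest⟩ := pow_decomp_unique 2 (by norm_num) α a _ _ habs hu1 hu2
  obtain ⟨hβb, hx2t⟩ := pow_decomp_unique 5 (by norm_num) β b _ _ hrest h5a h5t
  exact ⟨hαa, hβb, hx2t⟩

-- ===== VERDICT (by name: the statement is the Claim_ definition above) =====
theorem immiscible_spec : Claim_equal_immiscible := by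
  intro x _ hx
  have hx0 : x ≠ 0 := hx
  show immiscible x = immiscible_alt x
  have hf : x.natAbs ≤ 9 * x.natAbs + 10 := by omega
  obtain ⟨α, β, x2, hA2, hAfac, hA2d, hA5d, hx2⟩ := A_reduce x hx0 (9 * x.natAbs + 10) hf
  obtain ⟨a, b, y2, t, hB1, hB2, hBfac, hB2d, hB5d, ht⟩ := B_reduce x hx0 (9 * x.natAbs + 10) hf
  obtain ⟨hab1, hab2, habs⟩ := match_decomp hAfac hBfac hA2d hA5d hB2d hB5d
  simp only [immiscible, immiscible_alt]
  rw [hA2, hB1, hB2]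
  simp only [Prod.mk.injEq]
  constructor
  · -- the ones components: bSearch = powLoop, then lockstep with aOnes
    have hxt : x2 = t ∨ x2 = -t := (abs_eq (le_of_lt ht)).mp habs
    have hx2ne : x2 ≠ 0 := hx2
    have hb := pymod_bounds hx2ne 1
    rw [habs] at hb
    rw [bSearch_eq_powLoop _ (9*t) 1 (by omega) (by omega)]
    apply ones_lockstep ht hxt _ _ _ _ hb.1 hb.2
    have h1t : ((1:Int)).toNat = 1 := rfl
    rw [h1t, pow_one, PySem.Int.mod_eq_emod_of_pos (by omega : (0:Int) < 9 * t)]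
    have h10 : (10:Int) = 9 * 1 + 1 := by norm_num
    rw [h10, key_emod ht, pymod_emod t (by rcases hxt with h | h <;> subst h <;> [exact ⟨1, by ring⟩; exact ⟨-1, by ring⟩]) 1]
  · -- the zeros components
    subst hab1; subst hab2
    push_cast
    rfl
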